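-- pv_equiv track=rewrite | github.com/PhazonJim/AdventOfCode2020 | src/day5.py | get_pos
-- ===== SOURCE A (Python) =====
-- def get_pos(arr, chars, pos):
--     if len(arr) > 1:
--         if chars[pos] in ['F', 'L']:
--             return get_pos(arr[:len(arr)//2], chars, pos+1)
--         else:
--             return get_pos(arr[len(arr)//2:], chars, pos+1)
--     else:
--         return arr[0]
-- ===== SOURCE B (Python) =====
-- def get_pos(arr, chars, pos):
--     # Iterative two-pointer binary partition: track [lo, hi) indices instead of
--     # slicing (copying) the list at every level.
--     lo, hi = 0, len(arr)
--     while hi - lo > 1: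
--         if chars[pos] in ['F', 'L']:
--             hi = lo + (hi - lo) // 2
--         else:
--             lo = lo + (hi - lo) // 2
--         pos += 1
--     return arr[lo]
-- ===== Notes on version B (the rewrite author's own statement) =====
-- stated objective: alternative
-- what changed: Replaces A's recursion that copies a half-slice of the list at every level with an iterative two-pointer loop over [lo,hi) indices and a single final indexing, so no intermediate list is ever built.
import Mathlib
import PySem

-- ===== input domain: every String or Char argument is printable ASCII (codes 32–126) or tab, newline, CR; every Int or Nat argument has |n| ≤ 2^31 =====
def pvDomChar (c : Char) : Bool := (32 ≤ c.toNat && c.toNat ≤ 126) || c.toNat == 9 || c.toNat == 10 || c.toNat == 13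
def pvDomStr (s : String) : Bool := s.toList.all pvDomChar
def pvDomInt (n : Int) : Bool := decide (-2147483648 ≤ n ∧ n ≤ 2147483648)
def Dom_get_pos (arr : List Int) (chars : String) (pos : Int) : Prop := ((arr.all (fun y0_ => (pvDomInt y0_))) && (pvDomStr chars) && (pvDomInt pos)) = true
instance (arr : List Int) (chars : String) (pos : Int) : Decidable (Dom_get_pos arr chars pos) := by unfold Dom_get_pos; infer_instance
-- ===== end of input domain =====

-- B replaces A's slice-copying recursion with an iterative two-pointer [lo,hi) loop over indices (alternative decomposition; no intermediate lists).


-- ===== PORT A =====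
-- chars[pos] → PySem.Str.pyGet? (none = IndexError, excluded by Pre_); arr[0] likewise.
def get_pos (arr : List Int) (chars : String) (pos : Int) : Int :=
  if 1 < arr.length then
    match PySem.Str.pyGet? chars pos with
    | some c =>
      if (['F', 'L'] : List Char).contains c then
        get_pos (PySem.List.slice arr none (some ((arr.length / 2 : Nat) : Int))) chars (pos + 1)
      else
        get_pos (PySem.List.slice arr (some ((arr.length / 2 : Nat) : Int)) none) chars (pos + 1)
    | none => 0  -- IndexError in Python; outside Pre_
  else (PySem.List.pyGet? arr 0).getD 0  -- arr[0]; IndexError on [] is outside Pre_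
termination_by arr.length
decreasing_by
  · rw [PySem.List.slice_to_natCast]; simp [List.length_take]; omega
  · rw [PySem.List.slice_from_natCast]; simp [List.length_drop]; omega

-- ===== PORT B =====
def gpLoop (arr : List Int) (chars : String) (lo hi : Nat) (pos : Int) : Int :=
  if 1 < hi - lo then
    match PySem.Str.pyGet? chars pos with
    | some c =>
      if (['F', 'L'] : List Char).contains c then
        gpLoop arr chars lo (lo + (hi - lo) / 2) (pos + 1)
      else
        gpLoop arr chars (lo + (hi - lo) / 2) hi (pos + 1)
    | none => 0  -- IndexError in Python; outside Pre_
  else (PySem.List.pyGet? arr ((lo : Nat) : Int)).getD 0  -- arr[lo]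
termination_by hi - lo
decreasing_by
  · omega
  · omega

def get_pos_alt (arr : List Int) (chars : String) (pos : Int) : Int :=
  gpLoop arr chars 0 arr.length pos

-- ===== PRECONDITION & SPEC =====
-- On an array of length n ≥ 2 the partition reads m = ⌊log₂ n⌋ consecutive chars from pos,
-- plus one more iff the bits read (non-'F'/'L' char at pos+j contributing 2^j) sum to ≥ 2^(m+1) − n.
def gpBits (chars : String) (pos : Int) (m : Nat) : Nat :=
  (List.range m).foldl
    (fun (acc : Nat) (j : Nat) =>
      acc + if (['F', 'L'] : List Char).contains ((PySem.Str.pyGet? chars (pos + (j : Int))).getD 'F')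
            then 0 else 2 ^ j) 0

-- Pre_ excludes exactly the inputs on which Python A raises IndexError: the empty list, and a
-- chars index out of range somewhere along the partition path (the path reads ⌊log₂ n⌋
-- consecutive chars starting at pos, plus one more iff the bits read sum to ≥ 2^(⌊log₂ n⌋+1) − n).
def Pre_get_pos (arr : List Int) (chars : String) (pos : Int) : Prop :=
  arr ≠ [] ∧ (arr.length = 1 ∨
    (-(chars.toList.length : Int) ≤ pos ∧
     pos + (Nat.log 2 arr.length : Int) ≤ chars.toList.length ∧
     (gpBits chars pos (Nat.log 2 arr.length) + arr.length < 2 ^ (Nat.log 2 arr.length + 1) ∨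
      pos + (Nat.log 2 arr.length : Int) + 1 ≤ chars.toList.length)))
instance (arr : List Int) (chars : String) (pos : Int) : Decidable (Pre_get_pos arr chars pos) := by
  unfold Pre_get_pos; infer_instance

def pvWitness_get_pos : List Int × String × Int := ([1, 2, 3, 4], "FB", 0)

def Spec_get_pos (arr : List Int) (chars : String) (pos : Int) (out : Int) : Prop := out = get_pos_alt arr chars pos
instance (arr : List Int) (chars : String) (pos : Int) (out : Int) : Decidable (Spec_get_pos arr chars pos out) := by unfold Spec_get_pos; infer_instance

-- ===== CLAIM (what is proved, stated in full; the proofs are below) =====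
def Claim_equal_get_pos : Prop := ∀ (arr : List Int) (chars : String) (pos : Int), Dom_get_pos arr chars pos → Pre_get_pos arr chars pos → Spec_get_pos arr chars pos (get_pos arr chars pos)

-- ===== LEMMAS AND PROOFS =====

-- Loop invariant: A on the current window (as a sublist) equals B's loop on the [lo,hi) pointers.
lemma gp_key (arr : List Int) (chars : String) :
    ∀ (n lo hi : Nat) (pos : Int), hi - lo = n → lo < hi → hi ≤ arr.length →
      get_pos ((arr.drop lo).take (hi - lo)) chars pos = gpLoop arr chars lo hi pos := by
  intro n
  induction n using Nat.strong_induction_on with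
  | _ n ih =>
    intro lo hi pos hn hlt hle
    have hlen : ((arr.drop lo).take (hi - lo)).length = hi - lo := by
      simp [List.length_take, List.length_drop]; omega
    rw [get_pos, gpLoop, hlen]
    by_cases h1 : 1 < hi - lo
    · simp only [if_pos h1]
      cases hget : PySem.Str.pyGet? chars pos with
      | none => rfl
      | some c =>
        have hdt : PySem.List.slice ((arr.drop lo).take (hi - lo)) none
              (some (((hi - lo) / 2 : Nat) : Int)) = (arr.drop lo).take ((hi - lo) / 2) := by
          rw [PySem.List.slice_to_natCast, List.take_take]
          congr 1; omega
        have hdf : PySem.List.slice ((arr.drop lo).take (hi - lo))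
              (some (((hi - lo) / 2 : Nat) : Int)) none
              = (arr.drop (lo + (hi - lo) / 2)).take (hi - (lo + (hi - lo) / 2)) := by
          rw [PySem.List.slice_from_natCast, List.drop_take, List.drop_drop]
          congr 1; omega
        simp only [hdt, hdf]
        split
        · have e : lo + (hi - lo) / 2 - lo = (hi - lo) / 2 := by omega
          have := ih ((hi - lo) / 2) (by omega) lo (lo + (hi - lo) / 2) (pos + 1)
            (by omega) (by omega) (by omega)
          rw [e] at this; exact this
        · exact ih (hi - (lo + (hi - lo) / 2)) (by omega) (lo + (hi - lo) / 2) hi (pos + 1)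
            (by omega) (by omega) hle
    · simp only [if_neg h1]
      rw [PySem.List.pyGet?_natCast, PySem.List.pyGet?_zero]
      have hm : hi - lo = 1 := by omega
      simp [List.getElem?_drop, hm]

-- ===== VERDICT (by name: the statement is the Claim_ definition above) =====
theorem get_pos_spec : Claim_equal_get_pos := by
  intro arr chars pos _ hpre
  unfold Spec_get_pos get_pos_alt
  rcases arr with _ | ⟨a, rest⟩
  · exact absurd rfl hpre.1
  · have := gp_key (a :: rest) chars (a :: rest).length 0 (a :: rest).length pos rfl
      (by simp) (le_refl _)
    simpa using this
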